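-- pv_equiv track=rewrite | github.com/wommow82/daily-report | daily_reco_report_with_etf.py | classify_etf_group
-- ===== SOURCE A (Python) =====
-- CRYPTO_ETFS = [
--     # Bitcoin ETFs
--     "BITO","IBIT","FBTC","ARKB","BRRR",
--     # Ethereum ETFs
--     "EETH","ETHE"
-- ]
--
-- ETF_GROUPS = {
--     "Broad Market": {"SPY","VOO","IVV","VTI","QQQ","DIA","IWM"},
--     "Sector ETF": {"XLK","XLF","XLE","XLV","XLY","XLP","XLU","XLI","XLB","XLRE","XLC"},
--     "Thematic ETF": {"ARKK","ARKW","SMH","SOXX","IBB","TAN","HACK","CIBR"},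
--     "Crypto ETF": set(CRYPTO_ETFS),
-- }
--
-- def classify_etf_group(ticker: str) -> str:
--     u = ticker.upper()
--     for g, tickers in ETF_GROUPS.items():
--         if u in tickers:
--             return g
--     if u in CRYPTO_ETFS or "BTC" in u or "ETH" in u:
--         return "Crypto ETF"
--     if u in {"SMH","SOXX"}:
--         return "Thematic ETF"
--     if u in {"XLK","XLF","XLE","XLV","XLY","XLP","XLU","XLI","XLB","XLRE","XLC"}:
--         return "Sector ETF"
--     return "ETF"
-- ===== SOURCE B (Python) =====
-- CRYPTO_ETFS = [
--     "BITO","IBIT","FBTC","ARKB","BRRR",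
--     "EETH","ETHE"
-- ]
--
-- ETF_GROUPS = {
--     "Broad Market": {"SPY","VOO","IVV","VTI","QQQ","DIA","IWM"},
--     "Sector ETF": {"XLK","XLF","XLE","XLV","XLY","XLP","XLU","XLI","XLB","XLRE","XLC"},
--     "Thematic ETF": {"ARKK","ARKW","SMH","SOXX","IBB","TAN","HACK","CIBR"},
--     "Crypto ETF": set(CRYPTO_ETFS),
-- }
--
-- # flat reverse index built once: ticker -> group (tickers are unique across groups)
-- TICKER_TO_GROUP = {t: g for g, ts in ETF_GROUPS.items() for t in ts}
--
-- def classify_etf_group(ticker: str) -> str: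
--     u = ticker.upper()
--     g = TICKER_TO_GROUP.get(u)
--     if g is not None:
--         return g
--     if "BTC" in u or "ETH" in u:
--         return "Crypto ETF"
--     return "ETF"
-- ===== Notes on version B (the rewrite author's own statement) =====
-- stated objective: simpler
-- what changed: Replaces A's loop over the group table plus three dead fallback membership branches with a flat reverse-lookup dict (ticker -> group) built once, so classification is a single dict lookup followed by the only reachable fallback (BTC/ETH substring check).
import Mathlib
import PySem

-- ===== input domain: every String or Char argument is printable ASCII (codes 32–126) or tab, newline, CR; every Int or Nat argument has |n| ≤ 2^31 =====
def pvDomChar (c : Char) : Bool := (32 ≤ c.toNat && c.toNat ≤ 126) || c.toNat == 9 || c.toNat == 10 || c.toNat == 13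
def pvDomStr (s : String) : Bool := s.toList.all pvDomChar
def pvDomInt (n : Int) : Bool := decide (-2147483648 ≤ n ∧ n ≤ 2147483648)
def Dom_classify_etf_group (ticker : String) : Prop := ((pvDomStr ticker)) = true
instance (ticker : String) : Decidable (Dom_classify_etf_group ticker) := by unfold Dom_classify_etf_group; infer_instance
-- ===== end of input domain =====

-- B replaces A's loop over the group table (plus dead fallback branches) with a flat
-- reverse-lookup dict built once, for a simpler single-lookup classification.

-- ===== PORT A =====
def CRYPTO_ETFS : List String := ["BITO","IBIT","FBTC","ARKB","BRRR","EETH","ETHE"]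

def ETF_GROUPS : List (String × List String) :=
  [("Broad Market", ["SPY","VOO","IVV","VTI","QQQ","DIA","IWM"]),
   ("Sector ETF", ["XLK","XLF","XLE","XLV","XLY","XLP","XLU","XLI","XLB","XLRE","XLC"]),
   ("Thematic ETF", ["ARKK","ARKW","SMH","SOXX","IBB","TAN","HACK","CIBR"]),
   ("Crypto ETF", CRYPTO_ETFS)]

-- the 'for g, tickers in ETF_GROUPS.items(): if u in tickers: return g' loop
def classify_etf_group_loop (u : String) : List (String × List String) → Option String
  | [] => none
  | (g, ts) :: rest => if ts.contains u then some g else classify_etf_group_loop u rest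

def classify_etf_group (ticker : String) : String :=
  let u := PySem.Str.upper ticker
  match classify_etf_group_loop u ETF_GROUPS with
  | some g => g
  | none =>
    if CRYPTO_ETFS.contains u || PySem.Str.isIn "BTC" u || PySem.Str.isIn "ETH" u then
      "Crypto ETF"
    else if (["SMH","SOXX"] : List String).contains u then "Thematic ETF"
    else if (["XLK","XLF","XLE","XLV","XLY","XLP","XLU","XLI","XLB","XLRE","XLC"] : List String).contains u then
      "Sector ETF"
    else "ETF"

-- ===== PORT B =====
-- {t: g for g, ts in ETF_GROUPS.items() for t in ts}
def TICKER_TO_GROUP : PySem.Dict String String :=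
  ETF_GROUPS.foldl
    (fun d p => p.2.foldl (fun d t => PySem.Dict.insert d t p.1) d)
    PySem.Dict.empty

def classify_etf_group_alt (ticker : String) : String :=
  let u := PySem.Str.upper ticker
  match PySem.Dict.get? TICKER_TO_GROUP u with
  | some g => g
  | none =>
    if PySem.Str.isIn "BTC" u || PySem.Str.isIn "ETH" u then "Crypto ETF"
    else "ETF"

-- ===== PRECONDITION & SPEC =====
def Spec_classify_etf_group (ticker : String) (out : String) : Prop := out = classify_etf_group_alt ticker
instance (ticker : String) (out : String) : Decidable (Spec_classify_etf_group ticker out) := by unfold Spec_classify_etf_group; infer_instance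

-- ===== CLAIM (what is proved, stated in full; the proofs are below) =====
def Claim_equal_classify_etf_group : Prop := ∀ (ticker : String), Dom_classify_etf_group ticker → Spec_classify_etf_group ticker (classify_etf_group ticker)

-- ===== LEMMAS AND PROOFS =====

-- all tickers that appear in the table
def pvAllTickers : List String :=
  ["SPY","VOO","IVV","VTI","QQQ","DIA","IWM",
   "XLK","XLF","XLE","XLV","XLY","XLP","XLU","XLI","XLB","XLRE","XLC",
   "ARKK","ARKW","SMH","SOXX","IBB","TAN","HACK","CIBR",
   "BITO","IBIT","FBTC","ARKB","BRRR","EETH","ETHE"]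

lemma pv_core_eq (u : String) :
    (match classify_etf_group_loop u ETF_GROUPS with
     | some g => g
     | none =>
       if CRYPTO_ETFS.contains u || PySem.Str.isIn "BTC" u || PySem.Str.isIn "ETH" u then
         "Crypto ETF"
       else if (["SMH","SOXX"] : List String).contains u then "Thematic ETF"
       else if (["XLK","XLF","XLE","XLV","XLY","XLP","XLU","XLI","XLB","XLRE","XLC"] : List String).contains u then
         "Sector ETF"
       else "ETF")
    =
    (match PySem.Dict.get? TICKER_TO_GROUP u with
     | some g => g
     | none =>
       if PySem.Str.isIn "BTC" u || PySem.Str.isIn "ETH" u then "Crypto ETF"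
       else "ETF") := by
  by_cases h : u ∈ pvAllTickers
  · fin_cases h <;> rfl
  · simp only [pvAllTickers, List.mem_cons, List.not_mem_nil, or_false] at h
    push Not at h
    obtain ⟨h1,h2,h3,h4,h5,h6,h7,h8,h9,h10,h11,h12,h13,h14,h15,h16,h17,h18,h19,h20,
      h21,h22,h23,h24,h25,h26,h27,h28,h29,h30,h31,h32,h33⟩ := h
    simp [classify_etf_group_loop, ETF_GROUPS, CRYPTO_ETFS, TICKER_TO_GROUP,
      PySem.Dict.get?, PySem.Dict.insert, PySem.Dict.empty,
      beq_iff_eq,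
      h1,h2,h3,h4,h5,h6,h7,h8,h9,h10,h11,h12,h13,h14,h15,h16,h17,h18,h19,h20,
      h21,h22,h23,h24,h25,h26,h27,h28,h29,h30,h31,h32,h33,
      Ne.symm h1, Ne.symm h2, Ne.symm h3, Ne.symm h4, Ne.symm h5, Ne.symm h6, Ne.symm h7,
      Ne.symm h8, Ne.symm h9, Ne.symm h10, Ne.symm h11, Ne.symm h12, Ne.symm h13, Ne.symm h14,
      Ne.symm h15, Ne.symm h16, Ne.symm h17, Ne.symm h18, Ne.symm h19, Ne.symm h20, Ne.symm h21,
      Ne.symm h22, Ne.symm h23, Ne.symm h24, Ne.symm h25, Ne.symm h26, Ne.symm h27, Ne.symm h28,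
      Ne.symm h29, Ne.symm h30, Ne.symm h31, Ne.symm h32, Ne.symm h33]

-- ===== VERDICT (by name: the statement is the Claim_ definition above) =====
theorem classify_etf_group_spec : Claim_equal_classify_etf_group := by
  intro ticker _
  unfold Spec_classify_etf_group classify_etf_group classify_etf_group_alt
  exact pv_core_eq (PySem.Str.upper ticker)
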